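-- pv_equiv track=rewrite | github.com/shelkanife/IO-PMmethod2 | app/base_table.py | get_heading
-- ===== SOURCE A (Python) =====
-- def get_heading(nvariables,dataProblem):
--     s,e,a=1,1,1
--     heading=[f'X{i+1}' for i in range(nvariables)]
--     for i in dataProblem:
--         if i=="le":
--             heading.append('S{}'.format(s))
--             s+=1
--     for i in dataProblem:
--         if i=="ge":
--             heading.append('E{}'.format(e))
--             e+=1
--     for i in dataProblem:
--         if i=="ge" or i=="eq":
--             heading.append('A{}'.format(a))
--             a+=1
--     return heading
-- ===== SOURCE B (Python) =====
-- def get_heading(nvariables, dataProblem):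
--     xs = ['X%d' % (i + 1) for i in range(nvariables)]
--     sL, eL, aL = [], [], []
--     for t in dataProblem:
--         if t == "le":
--             sL.append('S%d' % (len(sL) + 1))
--         elif t == "ge":
--             eL.append('E%d' % (len(eL) + 1))
--             aL.append('A%d' % (len(aL) + 1))
--         elif t == "eq":
--             aL.append('A%d' % (len(aL) + 1))
--     return xs + sL + eL + aL
-- ===== Notes on version B (the rewrite author's own statement) =====
-- stated objective: alternative
-- what changed: Replaces A's three separate scans of dataProblem (one per counter with mutable counters s/e/a) by a single pass that appends into three bucket lists, numbering each label from the bucket's current length, then concatenates X-vars with the S, E and A buckets.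
import Mathlib
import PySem

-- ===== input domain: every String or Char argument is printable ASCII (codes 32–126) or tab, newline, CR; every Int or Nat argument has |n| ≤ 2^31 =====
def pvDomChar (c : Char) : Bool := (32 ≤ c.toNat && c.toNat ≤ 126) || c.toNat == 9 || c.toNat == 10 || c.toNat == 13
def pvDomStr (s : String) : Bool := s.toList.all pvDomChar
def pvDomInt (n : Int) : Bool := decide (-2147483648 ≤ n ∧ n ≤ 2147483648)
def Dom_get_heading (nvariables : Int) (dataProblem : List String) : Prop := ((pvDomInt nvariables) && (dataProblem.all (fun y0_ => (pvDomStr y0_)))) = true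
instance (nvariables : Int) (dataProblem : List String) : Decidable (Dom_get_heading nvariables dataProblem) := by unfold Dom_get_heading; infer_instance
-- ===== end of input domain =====

-- B makes one pass over dataProblem with three bucket lists instead of A's three scans; same output, stated as exact equivalence (no Pre_: A is total).

-- ===== PORT A =====
-- A: X-vars comprehension, then three successive loops over dataProblem, each
-- carrying the growing heading list and its own counter (s, then e, then a).
def get_heading (nvariables : Int) (dataProblem : List String) : List String :=
  let heading := (PySem.List.pyRange 0 nvariables 1).map (fun i => "X" ++ PySem.Int.toStr (i + 1))
  let hs := dataProblem.foldl (fun (p : List String × Int) i =>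
      if i = "le" then (p.1 ++ ["S" ++ PySem.Int.toStr p.2], p.2 + 1) else p) (heading, 1)
  let he := dataProblem.foldl (fun (p : List String × Int) i =>
      if i = "ge" then (p.1 ++ ["E" ++ PySem.Int.toStr p.2], p.2 + 1) else p) (hs.1, 1)
  let ha := dataProblem.foldl (fun (p : List String × Int) i =>
      if i = "ge" ∨ i = "eq" then (p.1 ++ ["A" ++ PySem.Int.toStr p.2], p.2 + 1) else p) (he.1, 1)
  ha.1

-- ===== PORT B =====
-- B: one pass over dataProblem appending into three bucket lists, each label
-- numbered from its bucket's current length; concatenate at the end.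
def get_heading_alt (nvariables : Int) (dataProblem : List String) : List String :=
  let xs := (PySem.List.pyRange 0 nvariables 1).map (fun i => "X" ++ PySem.Int.toStr (i + 1))
  let st := dataProblem.foldl (fun (p : List String × List String × List String) t =>
      if t = "le" then (p.1 ++ ["S" ++ PySem.Int.toStr ((p.1.length : Int) + 1)], p.2.1, p.2.2)
      else if t = "ge" then (p.1, p.2.1 ++ ["E" ++ PySem.Int.toStr ((p.2.1.length : Int) + 1)],
                                  p.2.2 ++ ["A" ++ PySem.Int.toStr ((p.2.2.length : Int) + 1)])
      else if t = "eq" then (p.1, p.2.1, p.2.2 ++ ["A" ++ PySem.Int.toStr ((p.2.2.length : Int) + 1)])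
      else p) ([], [], [])
  xs ++ st.1 ++ st.2.1 ++ st.2.2

-- ===== PRECONDITION & SPEC =====
def Spec_get_heading (nvariables : Int) (dataProblem : List String) (out : List String) : Prop := out = get_heading_alt nvariables dataProblem
instance (nvariables : Int) (dataProblem : List String) (out : List String) : Decidable (Spec_get_heading nvariables dataProblem out) := by unfold Spec_get_heading; infer_instance

-- ===== CLAIM (what is proved, stated in full; the proofs are below) =====
def Claim_equal_get_heading : Prop := ∀ (nvariables : Int) (dataProblem : List String), Dom_get_heading nvariables dataProblem → Spec_get_heading nvariables dataProblem (get_heading nvariables dataProblem)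

-- ===== LEMMAS AND PROOFS =====

-- canonical label streams: labels for a predicate, numbered from c upward
def pvLabels (pre : String) (cond : String → Bool) : List String → Int → List String
  | [], _ => []
  | t :: r, c => if cond t then (pre ++ PySem.Int.toStr c) :: pvLabels pre cond r (c + 1)
                 else pvLabels pre cond r c

-- A's generic loop produces h ++ the label stream
theorem pvA_loop (pre : String) (cond : String → Bool) :
    ∀ (dp : List String) (h : List String) (c : Int),
      (dp.foldl (fun (p : List String × Int) i =>
        if cond i then (p.1 ++ [pre ++ PySem.Int.toStr p.2], p.2 + 1) else p) (h, c)).1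
      = h ++ pvLabels pre cond dp c := by
  intro dp
  induction dp with
  | nil => intro h c; simp [pvLabels]
  | cons t r ih =>
    intro h c
    by_cases ht : cond t <;> simp [List.foldl, pvLabels, ht, ih]

-- B's single fold produces the three label streams, numbered from bucket lengths
theorem pvB_loop :
    ∀ (dp : List String) (sL eL aL : List String),
      dp.foldl (fun (p : List String × List String × List String) t =>
        if t = "le" then (p.1 ++ ["S" ++ PySem.Int.toStr ((p.1.length : Int) + 1)], p.2.1, p.2.2)
        else if t = "ge" then (p.1, p.2.1 ++ ["E" ++ PySem.Int.toStr ((p.2.1.length : Int) + 1)],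
                                    p.2.2 ++ ["A" ++ PySem.Int.toStr ((p.2.2.length : Int) + 1)])
        else if t = "eq" then (p.1, p.2.1, p.2.2 ++ ["A" ++ PySem.Int.toStr ((p.2.2.length : Int) + 1)])
        else p) (sL, eL, aL)
      = (sL ++ pvLabels "S" (fun t => t == "le") dp ((sL.length : Int) + 1),
         eL ++ pvLabels "E" (fun t => t == "ge") dp ((eL.length : Int) + 1),
         aL ++ pvLabels "A" (fun t => t == "ge" || t == "eq") dp ((aL.length : Int) + 1)) := by
  intro dp
  induction dp with
  | nil => intro sL eL aL; simp [pvLabels]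
  | cons t r ih =>
    intro sL eL aL
    by_cases h1 : t = "le"
    · simp [List.foldl, pvLabels, h1, ih]
    · by_cases h2 : t = "ge"
      · simp [List.foldl, pvLabels, h2, ih]
      · by_cases h3 : t = "eq"
        · simp [List.foldl, pvLabels, h3, ih]
        · simp [List.foldl, pvLabels, h1, h2, h3, ih]

-- ===== VERDICT (by name: the statement is the Claim_ definition above) =====
theorem get_heading_spec : Claim_equal_get_heading := by
  intro n dp _
  show get_heading n dp = get_heading_alt n dp
  unfold get_heading get_heading_alt
  rw [pvB_loop]
  have hS := pvA_loop "S" (fun t => t == "le") dp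
  have hE := pvA_loop "E" (fun t => t == "ge") dp
  have hA := pvA_loop "A" (fun t => t == "ge" || t == "eq") dp
  simp only [beq_iff_eq, Bool.or_eq_true] at hS hE hA
  simp only []
  rw [hA, hE, hS]
  simp
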